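-- pv_equiv track=rewrite | github.com/vinchinzu/euler | python/782/verify_large_n.py | achievable_with_block
-- ===== SOURCE A (Python) =====
-- def achievable_with_block(n):
--     """
--     k values achievable with complexity ≤ 3 using block-like structures.
--
--     Structure 1: a×b block of 1s (top-left), rest 0.
--     k = a*b, complexity depends on a, b.
--
--     Structure 2: Two blocks.
--     Structure 3: L-shaped regions.
--     """
--     achievable = set()
--
--     # Structure: a1 rows of weight w1, a2 rows of weight w2 (a1+a2 = n)
--     # Rows of weight w: first w positions are 1, rest 0.
--     # k = a1*w1 + a2*w2.
--     # Complexity depends on column structure.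
--
--     for a1 in range(n+1):
--         a2 = n - a1
--         for w1 in range(n+1):
--             for w2 in range(n+1):
--                 k = a1 * w1 + a2 * w2
--
--                 if k < 0 or k > n*n:
--                     continue
--
--                 # Build matrix:
--                 # First a1 rows: (1^w1, 0^{n-w1})
--                 # Last a2 rows: (1^w2, 0^{n-w2})
--                 P = tuple([1]*w1 + [0]*(n-w1))
--                 Q = tuple([1]*w2 + [0]*(n-w2))
--
--                 # Determine column patterns
--                 # Columns 0..min(w1,w2)-1: all 1s from both row types -> (1,...,1) if a1>0 and a2>0
--                 # etc.
--
--                 # Just build and compute directly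
--                 matrix = [list(P)] * a1 + [list(Q)] * a2
--
--                 patterns = set()
--                 for row in matrix:
--                     patterns.add(tuple(row))
--                 for j in range(n):
--                     col = tuple(matrix[i][j] for i in range(n))
--                     patterns.add(col)
--
--                 comp = len(patterns)
--                 if comp <= 3 and 0 < k < n*n:
--                     achievable.add(k)
--
--     # Also try permuted rows (not just block arrangement)
--     # Key: for 2 row types, we can try σ = various vectors
--     # For 3-pattern complexity, we can try σ such that σ is one of the
--     # column patterns.
--
--     # Try: σ has a1 ones at specific positions that create nice column patterns
--     # E.g., σ has ones at positions 0..a1-1 (block) - already done.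
--     # Or σ has ones at positions matching Q's 1s.
--
--     for a1 in range(n+1):
--         a2 = n - a1
--         for w1 in range(n+1):
--             for w2 in range(n+1):
--                 k = a1 * w1 + a2 * w2
--                 if k <= 0 or k >= n*n:
--                     continue
--                 if k in achievable:
--                     continue
--
--                 P = [1]*w1 + [0]*(n-w1)
--                 Q = [1]*w2 + [0]*(n-w2)
--
--                 # Try σ = Q (σ[i] = Q[i] for each i)
--                 sigma = Q[:]
--                 if sum(sigma) != a1:
--                     continue
--
--                 matrix = []
--                 for i in range(n):
--                     if sigma[i]:
--                         matrix.append(P[:])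
--                     else:
--                         matrix.append(Q[:])
--
--                 patterns = set()
--                 for row in matrix:
--                     patterns.add(tuple(row))
--                 for j in range(n):
--                     col = tuple(matrix[i][j] for i in range(n))
--                     patterns.add(col)
--
--                 comp = len(patterns)
--                 if comp <= 3:
--                     achievable.add(k)
--
--     return achievable
-- ===== SOURCE B (Python) =====
-- def achievable_with_block(n):
--     """Same achievable set, computed without materialising the n x n matrix:
--     for each (a1, w1, w2) the distinct row/column patterns are among six
--     explicitly known vectors (hoisted out of the inner loops), so the pattern
--     count is found directly; already-achieved k are skipped, and the redundant
--     second pass of the original (whose sigma = Q matrix is the same block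
--     matrix again) is dropped."""
--     achievable = set()
--     full = n * n
--     for a1 in range(n + 1):
--         a2 = n - a1
--         c11 = (1,) * a1 + (1,) * a2
--         c10 = (1,) * a1 + (0,) * a2
--         c01 = (0,) * a1 + (1,) * a2
--         c00 = (0,) * a1 + (0,) * a2
--         for w1 in range(n + 1):
--             r1 = (1,) * w1 + (0,) * (n - w1)
--             for w2 in range(n + 1):
--                 k = a1 * w1 + a2 * w2
--                 if not (0 < k < full):
--                     continue
--                 if k in achievable:
--                     continue
--                 pats = set()
--                 if a1 > 0:
--                     pats.add(r1)
--                 if a2 > 0: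
--                     pats.add((1,) * w2 + (0,) * (n - w2))
--                 if min(w1, w2) > 0:
--                     pats.add(c11)
--                 if w2 < w1:
--                     pats.add(c10)
--                 if w1 < w2:
--                     pats.add(c01)
--                 if max(w1, w2) < n:
--                     pats.add(c00)
--                 if len(pats) <= 3:
--                     achievable.add(k)
--     return achievable
-- ===== Notes on version B (the rewrite author's own statement) =====
-- stated objective: faster
-- what changed: Instead of materialising the n x n matrix and extracting all n columns per (a1,w1,w2) triple, B derives the at most six possible distinct row/column vectors of the two-row-type block matrix by case analysis (hoisted out of the inner loops), counts them directly, skips k values already found, and drops the second sigma=Q pass of A, which rebuilds the same block matrix and can never add a new k; intended as faster: a timing run measured A at many tens of times B's time at the largest sizes A finishes, while on very large n both exceed the harness budget.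
import Mathlib
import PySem

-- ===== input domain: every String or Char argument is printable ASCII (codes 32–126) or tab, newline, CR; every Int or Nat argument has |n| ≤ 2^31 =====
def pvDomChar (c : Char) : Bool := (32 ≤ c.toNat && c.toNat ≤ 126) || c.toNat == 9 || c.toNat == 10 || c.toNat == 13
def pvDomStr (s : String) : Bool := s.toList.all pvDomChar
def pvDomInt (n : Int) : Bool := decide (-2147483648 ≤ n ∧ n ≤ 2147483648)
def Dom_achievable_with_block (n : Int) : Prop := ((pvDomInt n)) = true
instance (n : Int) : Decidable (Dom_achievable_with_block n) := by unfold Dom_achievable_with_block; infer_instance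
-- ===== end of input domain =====

-- B avoids building the n×n matrix: per (a1,w1,w2) it enumerates the ≤6 possible distinct
-- row/column vectors directly and drops A's redundant second (sigma = Q) pass.

-- ===== PORT A =====
def achievable_with_block (n : Int) : List Int :=
  let achievable : PySem.Set Int := PySem.Set.empty
  let achievable :=
    (PySem.List.pyRange 0 (n+1) 1).foldl (fun acc a1 =>
      let a2 := n - a1
      (PySem.List.pyRange 0 (n+1) 1).foldl (fun acc w1 =>
        (PySem.List.pyRange 0 (n+1) 1).foldl (fun acc w2 =>
          let k := a1 * w1 + a2 * w2
          if k < 0 ∨ k > n * n then acc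
          else
            let P : List Int := List.replicate w1.toNat 1 ++ List.replicate (n - w1).toNat 0
            let Q : List Int := List.replicate w2.toNat 1 ++ List.replicate (n - w2).toNat 0
            let matrix : List (List Int) := List.replicate a1.toNat P ++ List.replicate a2.toNat Q
            let patterns : PySem.Set (List Int) :=
              matrix.foldl (fun pats row => PySem.Set.add pats row) PySem.Set.empty
            let patterns :=
              (PySem.List.pyRange 0 n 1).foldl (fun pats j =>
                PySem.Set.add pats ((PySem.List.pyRange 0 n 1).map
                  (fun i => PySem.List.pyGetD (PySem.List.pyGetD matrix i []) j 0))) patterns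
            let comp := patterns.length
            if comp ≤ 3 ∧ 0 < k ∧ k < n * n then PySem.Set.add acc k else acc)
          acc) acc) achievable
  let achievable :=
    (PySem.List.pyRange 0 (n+1) 1).foldl (fun acc a1 =>
      let a2 := n - a1
      (PySem.List.pyRange 0 (n+1) 1).foldl (fun acc w1 =>
        (PySem.List.pyRange 0 (n+1) 1).foldl (fun acc w2 =>
          let k := a1 * w1 + a2 * w2
          if k ≤ 0 ∨ k ≥ n * n then acc
          else if PySem.Set.contains acc k then acc
          else
            let P : List Int := List.replicate w1.toNat 1 ++ List.replicate (n - w1).toNat 0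
            let Q : List Int := List.replicate w2.toNat 1 ++ List.replicate (n - w2).toNat 0
            let sigma := Q
            if sigma.sum ≠ a1 then acc
            else
              let matrix : List (List Int) :=
                (PySem.List.pyRange 0 n 1).foldl (fun m i =>
                  m ++ [if PySem.List.pyGetD sigma i 0 ≠ 0 then P else Q]) []
              let patterns : PySem.Set (List Int) :=
                matrix.foldl (fun pats row => PySem.Set.add pats row) PySem.Set.empty
              let patterns :=
                (PySem.List.pyRange 0 n 1).foldl (fun pats j =>
                  PySem.Set.add pats ((PySem.List.pyRange 0 n 1).map
                    (fun i => PySem.List.pyGetD (PySem.List.pyGetD matrix i []) j 0))) patterns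
              let comp := patterns.length
              if comp ≤ 3 then PySem.Set.add acc k else acc)
          acc) acc) achievable
  achievable

-- ===== PORT B =====
def achievable_with_block_alt (n : Int) : List Int :=
  let full := n * n
  (PySem.List.pyRange 0 (n+1) 1).foldl (fun acc a1 =>
    let a2 := n - a1
    let c11 : List Int := List.replicate a1.toNat 1 ++ List.replicate a2.toNat 1
    let c10 : List Int := List.replicate a1.toNat 1 ++ List.replicate a2.toNat 0
    let c01 : List Int := List.replicate a1.toNat 0 ++ List.replicate a2.toNat 1
    let c00 : List Int := List.replicate a1.toNat 0 ++ List.replicate a2.toNat 0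
    (PySem.List.pyRange 0 (n+1) 1).foldl (fun acc w1 =>
      let r1 : List Int := List.replicate w1.toNat 1 ++ List.replicate (n - w1).toNat 0
      (PySem.List.pyRange 0 (n+1) 1).foldl (fun acc w2 =>
        let k := a1 * w1 + a2 * w2
        if ¬ (0 < k ∧ k < full) then acc
        else if PySem.Set.contains acc k then acc
        else
          let pats : PySem.Set (List Int) := PySem.Set.empty
          let pats := if a1 > 0 then PySem.Set.add pats r1 else pats
          let pats := if a2 > 0 then
            PySem.Set.add pats (List.replicate w2.toNat (1:Int) ++ List.replicate (n - w2).toNat 0) else pats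
          let pats := if min w1 w2 > 0 then PySem.Set.add pats c11 else pats
          let pats := if w2 < w1 then PySem.Set.add pats c10 else pats
          let pats := if w1 < w2 then PySem.Set.add pats c01 else pats
          let pats := if max w1 w2 < n then PySem.Set.add pats c00 else pats
          if pats.length ≤ 3 then PySem.Set.add acc k else acc)
        acc) acc) PySem.Set.empty

-- ===== PRECONDITION & SPEC =====
def Spec_achievable_with_block (n : Int) (out : List Int) : Prop := out = achievable_with_block_alt n
instance (n : Int) (out : List Int) : Decidable (Spec_achievable_with_block n out) := by unfold Spec_achievable_with_block; infer_instance

-- ===== CLAIM (what is proved, stated in full; the proofs are below) =====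
def Claim_equal_achievable_with_block : Prop := ∀ (n : Int), Dom_achievable_with_block n → Spec_achievable_with_block n (achievable_with_block n)

-- ===== LEMMAS AND PROOFS =====
theorem repGet {α : Type} [Inhabited α] (a b i : Int) (x y : α) (d : α)
    (ha : 0 ≤ a) (hi : 0 ≤ i) (hib : i < a + b) :
    PySem.List.pyGetD (List.replicate a.toNat x ++ List.replicate b.toNat y) i d =
      if i < a then x else y := by
  have hlen : (List.replicate a.toNat x ++ List.replicate b.toNat y).length = a.toNat + b.toNat := by simp
  rw [PySem.List.pyGetD_eq_getElem _ d hi (by simp; omega)]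
  rw [List.getElem_append]
  split_ifs with h1 h2 h2
  · rw [List.getElem_replicate]
  · simp at h1; omega
  · simp at h1 h2; omega
  · rw [List.getElem_replicate]

theorem mapSplit {α : Type} (a n : Int) (x y : α) (ha : 0 ≤ a) (han : a ≤ n) :
    (PySem.List.pyRange 0 n 1).map (fun i => if i < a then x else y) =
      List.replicate a.toNat x ++ List.replicate (n - a).toNat y := by
  apply List.ext_getElem
  · simp [PySem.List.length_pyRange_one]; omega
  intro idx hi1 hi2
  have hidx : idx < (n - 0).toNat := by
    simpa [PySem.List.length_pyRange_one] using hi1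
  simp only [List.getElem_map, PySem.List.getElem_pyRange_one, List.getElem_append,
    List.getElem_replicate, List.length_replicate]
  split_ifs with hA hB hB
  · rfl
  · exfalso; omega
  · exfalso; omega
  · rfl

def rowV (n w : Int) : List Int :=
  List.replicate w.toNat 1 ++ List.replicate (n - w).toNat 0

theorem sumRow (n w : Int) (hw : 0 ≤ w) : (rowV n w).sum = w := by
  unfold rowV
  rw [List.sum_append, List.sum_replicate, List.sum_replicate]
  simp; omega

def colV (a1 a2 x y : Int) : List Int :=
  List.replicate a1.toNat x ++ List.replicate a2.toNat y

def matA (n a1 w1 w2 : Int) : List (List Int) :=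
  List.replicate a1.toNat (rowV n w1) ++ List.replicate (n - a1).toNat (rowV n w2)

def colsA (n a1 w1 w2 : Int) : List (List Int) :=
  (PySem.List.pyRange 0 n 1).map (fun j => (PySem.List.pyRange 0 n 1).map
    (fun i => PySem.List.pyGetD (PySem.List.pyGetD (matA n a1 w1 w2) i []) j 0))

theorem colEq (n a1 w1 w2 j : Int) (ha : 0 ≤ a1) (ha' : a1 ≤ n)
    (hw1 : 0 ≤ w1) (hw2 : 0 ≤ w2) (hj : 0 ≤ j) (hj' : j < n) :
    (PySem.List.pyRange 0 n 1).map
      (fun i => PySem.List.pyGetD (PySem.List.pyGetD (matA n a1 w1 w2) i []) j 0) =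
      colV a1 (n - a1) (if j < w1 then 1 else 0) (if j < w2 then 1 else 0) := by
  have h1 : ∀ i ∈ PySem.List.pyRange 0 n 1,
      PySem.List.pyGetD (PySem.List.pyGetD (matA n a1 w1 w2) i []) j 0 =
        if i < a1 then (if j < w1 then (1:Int) else 0) else (if j < w2 then 1 else 0) := by
    intro i hi
    rw [PySem.List.mem_pyRange_one] at hi
    unfold matA
    rw [repGet a1 (n - a1) i _ _ _ ha hi.1 (by omega)]
    by_cases hia : i < a1
    · rw [if_pos hia, if_pos hia]
      unfold rowV
      rw [repGet w1 (n - w1) j _ _ _ hw1 hj (by omega)]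
    · rw [if_neg hia, if_neg hia]
      unfold rowV
      rw [repGet w2 (n - w2) j _ _ _ hw2 hj (by omega)]
  rw [List.map_congr_left h1]
  exact mapSplit a1 n _ _ ha ha'

theorem memMatA (n a1 w1 w2 : Int) (x : List Int) (ha : 0 ≤ a1) (ha' : a1 ≤ n) :
    x ∈ matA n a1 w1 w2 ↔
      (0 < a1 ∧ x = rowV n w1) ∨ (0 < n - a1 ∧ x = rowV n w2) := by
  unfold matA
  rw [List.mem_append, List.mem_replicate, List.mem_replicate]
  constructor
  · rintro (⟨h, rfl⟩ | ⟨h, rfl⟩)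
    · exact Or.inl ⟨by omega, rfl⟩
    · exact Or.inr ⟨by omega, rfl⟩
  · rintro (⟨h, rfl⟩ | ⟨h, rfl⟩)
    · exact Or.inl ⟨by omega, rfl⟩
    · exact Or.inr ⟨by omega, rfl⟩

theorem memColsA (n a1 w1 w2 : Int) (x : List Int) (ha : 0 ≤ a1) (ha' : a1 ≤ n)
    (hw1 : 0 ≤ w1) (hw1' : w1 ≤ n) (hw2 : 0 ≤ w2) (hw2' : w2 ≤ n) (hn : 0 < n) :
    x ∈ colsA n a1 w1 w2 ↔
      (0 < min w1 w2 ∧ x = colV a1 (n - a1) 1 1) ∨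
      (w2 < w1 ∧ x = colV a1 (n - a1) 1 0) ∨
      (w1 < w2 ∧ x = colV a1 (n - a1) 0 1) ∨
      (max w1 w2 < n ∧ x = colV a1 (n - a1) 0 0) := by
  unfold colsA
  rw [List.mem_map]
  constructor
  · rintro ⟨j, hj, rfl⟩
    rw [PySem.List.mem_pyRange_one] at hj
    rw [colEq n a1 w1 w2 j ha ha' hw1 hw2 hj.1 hj.2]
    by_cases h1 : j < w1 <;> by_cases h2 : j < w2
    · exact Or.inl ⟨by omega, by rw [if_pos h1, if_pos h2]⟩
    · exact Or.inr (Or.inl ⟨by omega, by rw [if_pos h1, if_neg h2]⟩)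
    · exact Or.inr (Or.inr (Or.inl ⟨by omega, by rw [if_neg h1, if_pos h2]⟩))
    · exact Or.inr (Or.inr (Or.inr ⟨by omega, by rw [if_neg h1, if_neg h2]⟩))
  · rintro (⟨h, rfl⟩ | ⟨h, rfl⟩ | ⟨h, rfl⟩ | ⟨h, rfl⟩)
    · refine ⟨0, by rw [PySem.List.mem_pyRange_one]; omega, ?_⟩
      rw [colEq n a1 w1 w2 0 ha ha' hw1 hw2 le_rfl hn,
        if_pos (by omega), if_pos (by omega)]
    · refine ⟨w2, by rw [PySem.List.mem_pyRange_one]; omega, ?_⟩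
      rw [colEq n a1 w1 w2 w2 ha ha' hw1 hw2 hw2 (by omega),
        if_pos (by omega), if_neg (by omega)]
    · refine ⟨w1, by rw [PySem.List.mem_pyRange_one]; omega, ?_⟩
      rw [colEq n a1 w1 w2 w1 ha ha' hw1 hw2 hw1 (by omega),
        if_neg (by omega), if_pos (by omega)]
    · refine ⟨max w1 w2, by rw [PySem.List.mem_pyRange_one]; omega, ?_⟩
      rw [colEq n a1 w1 w2 (max w1 w2) ha ha' hw1 hw2 (by omega) (by omega),
        if_neg (by omega), if_neg (by omega)]

theorem lenEqOfMemIff {α : Type} (s t : List α) (hs : s.Nodup) (ht : t.Nodup)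
    (h : ∀ x, x ∈ s ↔ x ∈ t) : s.length = t.length :=
  ((List.perm_ext_iff_of_nodup hs ht).2 h).length_eq

theorem memAddIf {α : Type} [BEq α] [LawfulBEq α] (c : Prop) [Decidable c]
    (s : PySem.Set α) (v x : α) :
    (x ∈ if c then PySem.Set.add s v else s) ↔ (c ∧ x = v) ∨ x ∈ s := by
  split_ifs with h
  · rw [PySem.Set.mem_add]; tauto
  · tauto

theorem nodupAddIf {α : Type} [BEq α] [LawfulBEq α] (c : Prop) [Decidable c]
    (s : PySem.Set α) (v : α) (hs : s.Nodup) :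
    (if c then PySem.Set.add s v else s).Nodup := by
  split_ifs with h
  · exact PySem.Set.nodup_add _ _ hs
  · exact hs

theorem compEq (n a1 w1 w2 : Int) (ha : 0 ≤ a1) (ha' : a1 ≤ n)
    (hw1 : 0 ≤ w1) (hw1' : w1 ≤ n) (hw2 : 0 ≤ w2) (hw2' : w2 ≤ n) (hn : 0 < n) :
    (PySem.Set.ofList (matA n a1 w1 w2 ++ colsA n a1 w1 w2)).length =
      (let pats : PySem.Set (List Int) := PySem.Set.empty
       let pats := if a1 > 0 then PySem.Set.add pats (rowV n w1) else pats
       let pats := if n - a1 > 0 then PySem.Set.add pats (rowV n w2) else pats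
       let pats := if min w1 w2 > 0 then PySem.Set.add pats (colV a1 (n - a1) 1 1) else pats
       let pats := if w2 < w1 then PySem.Set.add pats (colV a1 (n - a1) 1 0) else pats
       let pats := if w1 < w2 then PySem.Set.add pats (colV a1 (n - a1) 0 1) else pats
       let pats := if max w1 w2 < n then PySem.Set.add pats (colV a1 (n - a1) 0 0) else pats
       pats).length := by
  apply lenEqOfMemIff
  · exact PySem.Set.nodup_ofList _
  · simp only []
    repeat' apply nodupAddIf
    exact List.nodup_nil
  · intro x
    rw [PySem.Set.mem_ofList, List.mem_append,
      memMatA n a1 w1 w2 x ha ha',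
      memColsA n a1 w1 w2 x ha ha' hw1 hw1' hw2 hw2' hn]
    simp only [memAddIf]
    simp only [PySem.Set.empty, List.not_mem_nil, or_false]
    tauto

def stepC (n a1 w1 w2 : Int) (acc : PySem.Set Int) : PySem.Set Int :=
  if (PySem.Set.ofList (matA n a1 w1 w2 ++ colsA n a1 w1 w2)).length ≤ 3 ∧
      0 < a1 * w1 + (n - a1) * w2 ∧ a1 * w1 + (n - a1) * w2 < n * n
  then PySem.Set.add acc (a1 * w1 + (n - a1) * w2) else acc

def phase1C (n : Int) : PySem.Set Int :=
  (PySem.List.pyRange 0 (n+1) 1).foldl (fun acc a1 =>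
    (PySem.List.pyRange 0 (n+1) 1).foldl (fun acc w1 =>
      (PySem.List.pyRange 0 (n+1) 1).foldl (fun acc w2 =>
        stepC n a1 w1 w2 acc) acc) acc) PySem.Set.empty

theorem patternsEq (n a1 w1 w2 : Int) :
    (PySem.List.pyRange 0 n 1).foldl (fun pats j =>
        PySem.Set.add pats ((PySem.List.pyRange 0 n 1).map
          (fun i => PySem.List.pyGetD (PySem.List.pyGetD (matA n a1 w1 w2) i []) j 0)))
      ((matA n a1 w1 w2).foldl (fun pats row => PySem.Set.add pats row) PySem.Set.empty) =
      PySem.Set.ofList (matA n a1 w1 w2 ++ colsA n a1 w1 w2) := by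
  have hrows : (matA n a1 w1 w2).foldl (fun pats row => PySem.Set.add pats row) PySem.Set.empty
      = PySem.Set.ofList (matA n a1 w1 w2) := rfl
  rw [hrows, ← PySem.Set.update_map_eq_foldl_add, ← PySem.Set.ofList_append]
  rfl

theorem kBounds (n a1 w1 w2 : Int) (ha : 0 ≤ a1) (ha' : a1 ≤ n)
    (hw1 : 0 ≤ w1) (hw1' : w1 ≤ n) (hw2 : 0 ≤ w2) (hw2' : w2 ≤ n) :
    0 ≤ a1 * w1 + (n - a1) * w2 ∧ a1 * w1 + (n - a1) * w2 ≤ n * n := by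
  constructor
  · have h1 := mul_nonneg ha hw1
    have h2 := mul_nonneg (by omega : (0:Int) ≤ n - a1) hw2
    omega
  · have h1 : a1 * w1 ≤ a1 * n := mul_le_mul_of_nonneg_left hw1' ha
    have h2 : (n - a1) * w2 ≤ (n - a1) * n := mul_le_mul_of_nonneg_left hw2' (by omega)
    nlinarith

theorem posN (n a1 w1 w2 : Int) (ha : 0 ≤ a1) (ha' : a1 ≤ n)
    (hw2 : 0 ≤ w2) (hk : 0 < a1 * w1 + (n - a1) * w2) : 0 < n := by
  by_contra h
  push_neg at h
  have ha0 : a1 = 0 := le_antisymm (le_trans ha' h) ha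
  rw [ha0] at hk
  simp at hk
  nlinarith

theorem phase1Eq (n : Int) :
    (PySem.List.pyRange 0 (n+1) 1).foldl (fun acc a1 =>
      let a2 := n - a1
      (PySem.List.pyRange 0 (n+1) 1).foldl (fun acc w1 =>
        (PySem.List.pyRange 0 (n+1) 1).foldl (fun acc w2 =>
          let k := a1 * w1 + a2 * w2
          if k < 0 ∨ k > n * n then acc
          else
            let P : List Int := List.replicate w1.toNat 1 ++ List.replicate (n - w1).toNat 0
            let Q : List Int := List.replicate w2.toNat 1 ++ List.replicate (n - w2).toNat 0
            let matrix : List (List Int) := List.replicate a1.toNat P ++ List.replicate a2.toNat Q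
            let patterns : PySem.Set (List Int) :=
              matrix.foldl (fun pats row => PySem.Set.add pats row) PySem.Set.empty
            let patterns :=
              (PySem.List.pyRange 0 n 1).foldl (fun pats j =>
                PySem.Set.add pats ((PySem.List.pyRange 0 n 1).map
                  (fun i => PySem.List.pyGetD (PySem.List.pyGetD matrix i []) j 0))) patterns
            let comp := patterns.length
            if comp ≤ 3 ∧ 0 < k ∧ k < n * n then PySem.Set.add acc k else acc)
          acc) acc) PySem.Set.empty = phase1C n := by
  unfold phase1C
  apply PySem.List.foldl_congr_mem
  intro acc a1 ha1
  rw [PySem.List.mem_pyRange_one] at ha1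
  simp only []
  apply PySem.List.foldl_congr_mem
  intro acc w1 hw1
  rw [PySem.List.mem_pyRange_one] at hw1
  apply PySem.List.foldl_congr_mem
  intro acc w2 hw2
  rw [PySem.List.mem_pyRange_one] at hw2
  dsimp only
  have hmat : List.replicate a1.toNat (List.replicate w1.toNat (1:Int) ++ List.replicate (n - w1).toNat 0) ++
      List.replicate (n - a1).toNat (List.replicate w2.toNat 1 ++ List.replicate (n - w2).toNat 0) =
      matA n a1 w1 w2 := rfl
  rw [hmat, patternsEq n a1 w1 w2]
  have hkb := kBounds n a1 w1 w2 (by omega) (by omega) (by omega) (by omega) (by omega) (by omega)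
  rw [if_neg (by push_neg; exact ⟨hkb.1, hkb.2⟩)]
  rfl

theorem altEq (n : Int) : achievable_with_block_alt n = phase1C n := by
  unfold achievable_with_block_alt phase1C
  apply PySem.List.foldl_congr_mem
  intro acc a1 ha1
  rw [PySem.List.mem_pyRange_one] at ha1
  dsimp only
  apply PySem.List.foldl_congr_mem
  intro acc w1 hw1
  rw [PySem.List.mem_pyRange_one] at hw1
  apply PySem.List.foldl_congr_mem
  intro acc w2 hw2
  rw [PySem.List.mem_pyRange_one] at hw2
  dsimp only
  unfold stepC
  by_cases hk : 0 < a1 * w1 + (n - a1) * w2 ∧ a1 * w1 + (n - a1) * w2 < n * n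
  · rw [if_neg (by tauto)]
    by_cases hcon : PySem.Set.contains acc (a1 * w1 + (n - a1) * w2) = true
    · rw [if_pos hcon]
      have hmem : a1 * w1 + (n - a1) * w2 ∈ acc := (PySem.Set.contains_iff _ _).1 hcon
      split_ifs with h
      · rw [PySem.Set.add_of_mem hmem]
      · rfl
    · rw [if_neg hcon]
      have hn : 0 < n := posN n a1 w1 w2 (by omega) (by omega) (by omega) hk.1
      have hc := compEq n a1 w1 w2 (by omega) (by omega) (by omega) (by omega) (by omega) (by omega) hn
      simp only [rowV, colV] at hc
      rw [← hc]
      exact if_congr (and_iff_left hk).symm rfl rfl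
  · rw [if_pos (by tauto), if_neg (by tauto)]

theorem stepCMono (n a1 w1 w2 : Int) (s : PySem.Set Int) (x : Int) (hx : x ∈ s) :
    x ∈ stepC n a1 w1 w2 s := by
  unfold stepC
  split_ifs with h
  · exact (PySem.Set.mem_add _ _ _).2 (Or.inl hx)
  · exact hx

theorem foldlMono {α β : Type} (l : List α) (f : List β → α → List β)
    (hf : ∀ s a x, x ∈ s → x ∈ f s a) :
    ∀ s x, x ∈ s → x ∈ l.foldl f s := by
  induction l with
  | nil => intro s x hx; simpa using hx
  | cons a l ih => intro s x hx; exact ih _ _ (hf _ _ _ hx)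

theorem foldlAttain {α β : Type} (l : List α) (f : List β → α → List β)
    (hf : ∀ s a x, x ∈ s → x ∈ f s a) (t : α) (ht : t ∈ l) (x : β)
    (hx : ∀ s, x ∈ f s t) : ∀ s, x ∈ l.foldl f s := by
  induction l with
  | nil => cases ht
  | cons a l ih =>
    intro s
    rcases List.mem_cons.1 ht with h | h
    · subst h; exact foldlMono l f hf _ _ (hx s)
    · exact ih h _

theorem foldlFix {α β : Type} (l : List α) (f : β → α → β) (s : β)
    (h : ∀ a ∈ l, f s a = s) : l.foldl f s = s := by
  induction l with
  | nil => rfl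
  | cons a l ih =>
    rw [List.foldl_cons, h a List.mem_cons_self]
    exact ih (fun b hb => h b (List.mem_cons_of_mem _ hb))

theorem phase1CMem (n a1 w1 w2 : Int) (ha : 0 ≤ a1) (ha' : a1 < n + 1)
    (hw1 : 0 ≤ w1) (hw1' : w1 < n + 1) (hw2 : 0 ≤ w2) (hw2' : w2 < n + 1)
    (hcond : (PySem.Set.ofList (matA n a1 w1 w2 ++ colsA n a1 w1 w2)).length ≤ 3 ∧
      0 < a1 * w1 + (n - a1) * w2 ∧ a1 * w1 + (n - a1) * w2 < n * n) :
    a1 * w1 + (n - a1) * w2 ∈ phase1C n := by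
  unfold phase1C
  have monoMid : ∀ (a1' w1' : Int) (s : PySem.Set Int) (x : Int), x ∈ s →
      x ∈ (PySem.List.pyRange 0 (n+1) 1).foldl (fun acc w2' => stepC n a1' w1' w2' acc) s :=
    fun a1' w1' => foldlMono _ _ (fun s w2' x hx => stepCMono n a1' w1' w2' s x hx)
  have monoTop : ∀ (a1' : Int) (s : PySem.Set Int) (x : Int), x ∈ s →
      x ∈ (PySem.List.pyRange 0 (n+1) 1).foldl (fun acc w1' =>
        (PySem.List.pyRange 0 (n+1) 1).foldl (fun acc w2' => stepC n a1' w1' w2' acc) acc) s :=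
    fun a1' => foldlMono _ _ (fun s w1' x hx => monoMid a1' w1' s x hx)
  apply foldlAttain _ _ (fun s a1' x hx => monoTop a1' s x hx)
    a1 (by rw [PySem.List.mem_pyRange_one]; omega) _ ?_
  intro s
  apply foldlAttain _ _ (fun s w1' x hx => monoMid a1 w1' s x hx)
    w1 (by rw [PySem.List.mem_pyRange_one]; omega) _ ?_
  intro s
  apply foldlAttain _ _ (fun s w2' x hx => stepCMono n a1 w1 w2' s x hx)
    w2 (by rw [PySem.List.mem_pyRange_one]; omega) _ ?_
  intro s
  unfold stepC
  rw [if_pos hcond]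
  exact (PySem.Set.mem_add _ _ _).2 (Or.inr rfl)

theorem phase2Id (n : Int) :
    (PySem.List.pyRange 0 (n+1) 1).foldl (fun acc a1 =>
      let a2 := n - a1
      (PySem.List.pyRange 0 (n+1) 1).foldl (fun acc w1 =>
        (PySem.List.pyRange 0 (n+1) 1).foldl (fun acc w2 =>
          let k := a1 * w1 + a2 * w2
          if k ≤ 0 ∨ k ≥ n * n then acc
          else if PySem.Set.contains acc k then acc
          else
            let P : List Int := List.replicate w1.toNat 1 ++ List.replicate (n - w1).toNat 0
            let Q : List Int := List.replicate w2.toNat 1 ++ List.replicate (n - w2).toNat 0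
            let sigma := Q
            if sigma.sum ≠ a1 then acc
            else
              let matrix : List (List Int) :=
                (PySem.List.pyRange 0 n 1).foldl (fun m i =>
                  m ++ [if PySem.List.pyGetD sigma i 0 ≠ 0 then P else Q]) []
              let patterns : PySem.Set (List Int) :=
                matrix.foldl (fun pats row => PySem.Set.add pats row) PySem.Set.empty
              let patterns :=
                (PySem.List.pyRange 0 n 1).foldl (fun pats j =>
                  PySem.Set.add pats ((PySem.List.pyRange 0 n 1).map
                    (fun i => PySem.List.pyGetD (PySem.List.pyGetD matrix i []) j 0))) patterns
              let comp := patterns.length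
              if comp ≤ 3 then PySem.Set.add acc k else acc)
          acc) acc) (phase1C n) = phase1C n := by
  apply foldlFix
  intro a1 ha1
  rw [PySem.List.mem_pyRange_one] at ha1
  dsimp only
  apply foldlFix
  intro w1 hw1
  rw [PySem.List.mem_pyRange_one] at hw1
  apply foldlFix
  intro w2 hw2
  rw [PySem.List.mem_pyRange_one] at hw2
  dsimp only
  by_cases hg : a1 * w1 + (n - a1) * w2 ≤ 0 ∨ a1 * w1 + (n - a1) * w2 ≥ n * n
  · rw [if_pos hg]
  · rw [if_neg hg]
    push_neg at hg
    by_cases hc : PySem.Set.contains (phase1C n) (a1 * w1 + (n - a1) * w2) = true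
    · rw [if_pos hc]
    · rw [if_neg hc]
      have hsum : (List.replicate w2.toNat (1:Int) ++ List.replicate (n - w2).toNat 0).sum = w2 :=
        sumRow n w2 (by omega)
      by_cases hs : (List.replicate w2.toNat (1:Int) ++ List.replicate (n - w2).toNat 0).sum ≠ a1
      · rw [if_pos hs]
      · rw [if_neg hs]
        have hw2a : w2 = a1 := by omega
        have hmap : ∀ i ∈ PySem.List.pyRange 0 n 1,
            (if PySem.List.pyGetD (List.replicate w2.toNat (1:Int) ++ List.replicate (n - w2).toNat 0) i 0 ≠ 0
             then List.replicate w1.toNat (1:Int) ++ List.replicate (n - w1).toNat 0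
             else List.replicate w2.toNat (1:Int) ++ List.replicate (n - w2).toNat 0) =
            (if i < a1 then rowV n w1 else rowV n w2) := by
          intro i hi
          rw [PySem.List.mem_pyRange_one] at hi
          rw [repGet w2 (n - w2) i _ _ _ (by omega) hi.1 (by omega)]
          by_cases hiw : i < w2
          · rw [if_pos hiw, if_pos (by norm_num), if_pos (by omega)]
            rfl
          · rw [if_neg hiw, if_neg (by norm_num), if_neg (by omega)]
            rfl
        have hmat2 :
            (PySem.List.pyRange 0 n 1).foldl (fun m i =>
              m ++ [if PySem.List.pyGetD (List.replicate w2.toNat (1:Int) ++ List.replicate (n - w2).toNat 0) i 0 ≠ 0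
                    then List.replicate w1.toNat (1:Int) ++ List.replicate (n - w1).toNat 0
                    else List.replicate w2.toNat (1:Int) ++ List.replicate (n - w2).toNat 0]) [] =
            matA n a1 w1 w2 := by
          rw [PySem.List.foldl_append_singleton_eq_map, List.nil_append,
            List.map_congr_left hmap, mapSplit a1 n _ _ (by omega) (by omega)]
          rfl
        rw [hmat2, patternsEq n a1 w1 w2]
        by_cases hcomp : (PySem.Set.ofList (matA n a1 w1 w2 ++ colsA n a1 w1 w2)).length ≤ 3
        · exfalso
          apply hc
          rw [PySem.Set.contains_iff]
          exact phase1CMem n a1 w1 w2 (by omega) (by omega) (by omega) (by omega) (by omega)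
            (by omega) ⟨hcomp, hg.1, hg.2⟩
        · rw [if_neg hcomp]

-- ===== VERDICT (by name: the statement is the Claim_ definition above) =====
theorem achievable_with_block_spec : Claim_equal_achievable_with_block := by
  intro n _
  unfold Spec_achievable_with_block achievable_with_block
  simp only []
  rw [phase1Eq n, phase2Id n, altEq n]
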